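-- pv_equiv track=rewrite | github.com/riki95/social-networks-anonymization | anonymity.py | eq_class
-- ===== SOURCE A (Python) =====
-- def eq_class(facts: dict):
--     eq_class = {}
--     for key, degrees in facts.items():
--         k = tuple(sorted(degrees))
--
--         if k not in eq_class:
--             eq_class[k] = [] # Initialize the value field for that empty key
--
--         eq_class[k].append(key)
--
--     return eq_class
-- ===== SOURCE B (Python) =====
-- def eq_class(facts: dict):
--     # Two-pass: list the canonical tuples in first-occurrence order, then
--     # collect each class's keys by one scan per class.
--     order = list(dict.fromkeys(tuple(sorted(d)) for d in facts.values()))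
--     return {c: [key for key, d in facts.items() if tuple(sorted(d)) == c]
--             for c in order}
-- ===== Notes on version B (the rewrite author's own statement) =====
-- stated objective: alternative
-- what changed: Replaces the single-pass hash-bucket accumulation with a two-pass decomposition: first dedup the canonical sorted-degree tuples in first-occurrence order, then build each class's key list by a comprehension scanning the facts.
import Mathlib
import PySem

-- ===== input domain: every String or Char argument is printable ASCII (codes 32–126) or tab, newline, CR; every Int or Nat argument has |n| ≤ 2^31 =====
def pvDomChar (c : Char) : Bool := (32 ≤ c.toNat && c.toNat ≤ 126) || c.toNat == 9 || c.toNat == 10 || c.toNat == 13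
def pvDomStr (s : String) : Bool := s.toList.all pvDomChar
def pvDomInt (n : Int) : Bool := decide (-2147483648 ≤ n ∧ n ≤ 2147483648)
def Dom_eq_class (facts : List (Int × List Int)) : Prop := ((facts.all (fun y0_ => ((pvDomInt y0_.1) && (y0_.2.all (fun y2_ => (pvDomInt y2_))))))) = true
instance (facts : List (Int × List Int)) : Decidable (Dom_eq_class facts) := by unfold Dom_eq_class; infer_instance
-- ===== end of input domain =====

-- B differs from A only in decomposition (two passes over the input instead of one
-- hash-bucket pass); both return the classes keyed by the sorted degree tuple, in
-- first-occurrence order, each class holding its keys in input order.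

-- ===== PORT A =====
-- A: one pass, a dict from canonical tuple to the accumulated key list.
def eq_class (facts : List (Int × List Int)) : List (List Int × List Int) :=
  (facts.foldl
    (fun d p =>
      let k := PySem.List.sorted p.2 (fun x => x) false
      -- 'if k not in eq_class: eq_class[k] = []'
      let d1 := if d.contains k then d else d.insert k []
      -- 'eq_class[k].append(key)'
      d1.insert k (d1.getD k [] ++ [p.1]))
    PySem.Dict.empty).items

-- ===== PORT B =====
-- B: dedup the canonical tuples in first-occurrence order, then one scan per class.
def eq_class_alt (facts : List (Int × List Int)) : List (List Int × List Int) :=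
  let order := PySem.List.dedup (facts.map (fun p => PySem.List.sorted p.2 (fun x => x) false))
  order.map (fun c =>
    (c, (facts.filter (fun p => PySem.List.sorted p.2 (fun x => x) false == c)).map (fun p => p.1)))

-- ===== PRECONDITION & SPEC =====
def Spec_eq_class (facts : List (Int × List Int)) (out : List (List Int × List Int)) : Prop := out = eq_class_alt facts
instance (facts : List (Int × List Int)) (out : List (List Int × List Int)) : Decidable (Spec_eq_class facts out) := by unfold Spec_eq_class; infer_instance

-- ===== CLAIM (what is proved, stated in full; the proofs are below) =====
def Claim_equal_eq_class : Prop := ∀ (facts : List (Int × List Int)), Dom_eq_class facts → Spec_eq_class facts (eq_class facts)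

-- ===== LEMMAS AND PROOFS =====

-- A's loop body is exactly Dict.modify with default [] and append.
theorem eq_class_step_eq_modify (d : PySem.Dict (List Int) (List Int)) (p : Int × List Int) :
    (let k := PySem.List.sorted p.2 (fun x => x) false
     let d1 := if d.contains k then d else d.insert k []
     d1.insert k (d1.getD k [] ++ [p.1]))
    = d.modify (PySem.List.sorted p.2 (fun x => x) false) [] (fun v => v ++ [p.1]) := by
  set k := PySem.List.sorted p.2 (fun x => x) false with hk
  by_cases h : d.contains k
  · simp [h, PySem.Dict.modify]
  · simp only [Bool.not_eq_true] at h
    simp [h, PySem.Dict.modify, PySem.Dict.getD_insert_self, PySem.Dict.insert_insert_self,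
      PySem.Dict.getD_of_not_contains d ([] : List Int) h]

-- ===== VERDICT (by name: the statement is the Claim_ definition above) =====
theorem eq_class_spec : Claim_equal_eq_class := by
  intro facts _
  unfold Spec_eq_class eq_class eq_class_alt
  have hstep : (facts.foldl
      (fun d p =>
        let k := PySem.List.sorted p.2 (fun x => x) false
        let d1 := if d.contains k then d else d.insert k []
        d1.insert k (d1.getD k [] ++ [p.1]))
      PySem.Dict.empty)
    = facts.foldl
        (fun d p => d.modify (PySem.List.sorted p.2 (fun x => x) false) [] (fun v => v ++ [p.1]))
        PySem.Dict.empty := by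
    apply PySem.List.foldl_congr_mem
    intro d p _
    exact eq_class_step_eq_modify d p
  rw [hstep]
  set D := facts.foldl
      (fun d p => d.modify (PySem.List.sorted p.2 (fun x => x) false) [] (fun v => v ++ [p.1]))
      PySem.Dict.empty with hD
  have hnd : D.keys.Nodup := by
    rw [hD]
    exact PySem.Dict.nodup_keys_foldl_modify_key facts
      (fun p => PySem.List.sorted p.2 (fun x => x) false) [] (fun _ p v => v ++ [p.1]) _
      (by simp [PySem.Dict.keys_empty])
  have hkeys : D.keys = PySem.List.dedup (facts.map (fun p => PySem.List.sorted p.2 (fun x => x) false)) := by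
    rw [hD, PySem.Dict.keys_foldl_modify_key facts
      (fun p => PySem.List.sorted p.2 (fun x => x) false) [] (fun _ p v => v ++ [p.1]),
      PySem.List.dedup_eq_ofList]
    simp [PySem.Set.update, PySem.Set.ofList_eq_foldl, PySem.Dict.keys_empty, List.foldl_map]
  have hgetD : ∀ c, D.getD c [] =
      (facts.filter (fun p => PySem.List.sorted p.2 (fun x => x) false == c)).map (fun p => p.1) := by
    intro c
    have : facts.foldl
        (fun d p => d.modify (PySem.List.sorted p.2 (fun x => x) false) [] (fun v => v ++ [p.1]))
        PySem.Dict.empty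
      = (facts.map (fun p => (PySem.List.sorted p.2 (fun x => x) false, p.1))).foldl
          (fun d q => d.modify q.1 [] (fun v => v ++ [q.2])) PySem.Dict.empty := by
      rw [List.foldl_map]
    rw [hD, this, PySem.Dict.getD_foldl_modify_append]
    simp [List.filter_map, Function.comp_def]
  rw [PySem.Dict.items_eq_map_keys D hnd [], hkeys]
  apply List.map_congr_left
  intro c _
  rw [hgetD c]
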